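-- pv_equiv track=rewrite | github.com/SlimShady177/Labaratornaya4-SD | Laba4.py | can_form_word
-- ===== SOURCE A (Python) =====
-- from collections import Counter
--
-- def can_form_word(input_sorted: str, word_sorted: str) -> bool:
--     if len(word_sorted) > len(input_sorted):
--         return False
--
--     input_counter = Counter(input_sorted)
--     word_counter = Counter(word_sorted)
--
--     for char, count in word_counter.items():
--         if input_counter[char] < count:
--             return False
--     return True
-- ===== SOURCE B (Python) =====
-- def can_form_word(input_sorted: str, word_sorted: str) -> bool:
--     need = {}
--     for ch in word_sorted:
--         need[ch] = need.get(ch, 0) + 1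
--     remaining = len(word_sorted)
--     for ch in input_sorted:
--         if need.get(ch, 0) > 0:
--             need[ch] = need[ch] - 1
--             remaining -= 1
--     return remaining == 0
-- ===== Notes on version B (the rewrite author's own statement) =====
-- stated objective: alternative
-- what changed: Replaces the length guard plus comparison of two finished Counter tables with a single pass over the input letters that decrements a shrinking need-dict and a remaining counter, answering via remaining == 0.
import Mathlib
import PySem

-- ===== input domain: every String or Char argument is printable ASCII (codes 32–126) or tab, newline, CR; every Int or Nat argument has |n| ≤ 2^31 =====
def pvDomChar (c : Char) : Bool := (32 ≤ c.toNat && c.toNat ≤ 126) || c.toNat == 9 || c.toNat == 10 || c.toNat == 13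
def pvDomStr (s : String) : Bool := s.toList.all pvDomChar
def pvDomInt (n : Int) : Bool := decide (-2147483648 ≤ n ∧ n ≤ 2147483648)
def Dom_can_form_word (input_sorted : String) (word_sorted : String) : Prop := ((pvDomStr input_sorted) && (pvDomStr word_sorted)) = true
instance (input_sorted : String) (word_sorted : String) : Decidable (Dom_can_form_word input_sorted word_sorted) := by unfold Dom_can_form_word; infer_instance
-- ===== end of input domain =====

-- B replaces A's length guard + two-Counter table comparison by one pass over the input letters
-- that decrements a need-dict and a remaining counter (alternative decomposition, same cost).

-- ===== PORT A =====
-- 'for char, count in word_counter.items(): if input_counter[char] < count: return False / return True'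
-- is the all-loop below; Counter lookup input_counter[char] defaults to 0 (Dict.getD _ 0).
def can_form_word (input_sorted : String) (word_sorted : String) : Bool :=
  if PySem.Str.len word_sorted > PySem.Str.len input_sorted then false
  else
    let input_counter := PySem.Dict.counter input_sorted.toList
    let word_counter := PySem.Dict.counter word_sorted.toList
    word_counter.items.all (fun p => !(input_counter.getD p.1 0 < p.2))

-- ===== PORT B =====
-- body of Source B's 'for ch in input_sorted' loop: decrement need[ch] and remaining when need still wants ch
def altStep (st : PySem.Dict Char Int × Int) (c : Char) : PySem.Dict Char Int × Int :=
  if st.1.getD c 0 > 0 then (st.1.insert c (st.1.getD c 0 - 1), st.2 - 1) else st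

def can_form_word_alt (input_sorted : String) (word_sorted : String) : Bool :=
  let need := word_sorted.toList.foldl (fun d c => d.insert c (d.getD c 0 + 1)) PySem.Dict.empty
  let st := input_sorted.toList.foldl altStep (need, (PySem.Str.len word_sorted : Int))
  st.2 == 0

-- ===== PRECONDITION & SPEC =====
def Spec_can_form_word (input_sorted : String) (word_sorted : String) (out : Bool) : Prop := out = can_form_word_alt input_sorted word_sorted
instance (input_sorted : String) (word_sorted : String) (out : Bool) : Decidable (Spec_can_form_word input_sorted word_sorted out) := by unfold Spec_can_form_word; infer_instance

-- ===== CLAIM (what is proved, stated in full; the proofs are below) =====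
def Claim_equal_can_form_word : Prop := ∀ (input_sorted : String) (word_sorted : String), Dom_can_form_word input_sorted word_sorted → Spec_can_form_word input_sorted word_sorted (can_form_word input_sorted word_sorted)

-- ===== LEMMAS AND PROOFS =====

-- A's Counter comparison succeeds exactly when every letter of w is covered by i count-wise.
theorem portA_eq_true_iff (i w : List Char) :
    ((PySem.Dict.counter w).items.all
      (fun p => !((PySem.Dict.counter i).getD p.1 0 < p.2)) = true)
    ↔ ∀ c ∈ w, w.count c ≤ i.count c := by
  rw [PySem.Dict.items_counter]
  simp only [List.all_map, List.all_eq_true]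
  constructor
  · intro h c hc
    have := h c (by simpa [PySem.Set.mem_ofList] using hc)
    simp [PySem.Dict.getD_counter] at this
    exact_mod_cast this
  · intro h c hc
    have := h c (by simpa [PySem.Set.mem_ofList] using hc)
    simp [PySem.Dict.getD_counter]
    exact_mod_cast this

-- B's input pass: if the dict holds exactly the counts of a pool of still-needed letters and
-- remaining is the pool's size, the final remaining is 0 iff the pool fits into the scanned letters.
theorem loop_rem (l : List Char) : ∀ (d : PySem.Dict Char Int) (pool : List Char),
    (∀ x, d.getD x 0 = (pool.count x : Int)) →
    (((l.foldl altStep (d, (pool.length : Int))).2 = 0) ↔ ∀ x, pool.count x ≤ l.count x) := by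
  induction l with
  | nil =>
    intro d pool h
    simp only [List.foldl_nil]
    constructor
    · intro h0 x
      have hp : pool.length = 0 := by exact_mod_cast h0
      simp [List.length_eq_zero_iff.mp hp]
    · intro hall
      have hp : pool = [] := by
        by_contra hne
        obtain ⟨y, hy⟩ := List.exists_mem_of_ne_nil pool hne
        have h1 : 1 ≤ pool.count y := List.one_le_count_iff.mpr hy
        have := hall y
        simp [List.count_nil] at this
        omega
      simp [hp]
  | cons c l ih =>
    intro d pool h
    simp only [List.foldl_cons]
    by_cases hpos : d.getD c 0 > 0
    · have hcnt : 0 < pool.count c := by have := h c; exact_mod_cast this ▸ hpos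
      have hmem : c ∈ pool := List.count_pos_iff.mp hcnt
      have hstep : altStep (d, (pool.length : Int)) c
          = (d.insert c (d.getD c 0 - 1), ((pool.erase c).length : Int)) := by
        simp only [altStep, if_pos hpos]
        have : (pool.erase c).length = pool.length - 1 := List.length_erase_of_mem hmem
        rw [this]
        have hlen : 1 ≤ pool.length := List.length_pos_of_mem hmem
        congr 1
        omega
      rw [hstep]
      have h' : ∀ x, (d.insert c (d.getD c 0 - 1)).getD x 0 = (((pool.erase c).count x : Nat) : Int) := by
        intro x
        rw [PySem.Dict.getD_insert, List.count_erase]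
        by_cases hxc : x = c
        · subst hxc
          simp only [beq_self_eq_true, if_true, h x]
          omega
        · have : (c == x) = false := by simp [Ne.symm hxc]
          simp only [if_neg hxc, this, Bool.false_eq_true, if_false, Nat.sub_zero, h x]
      rw [ih _ _ h']
      constructor
      · intro hall x
        have hx := hall x
        rw [List.count_erase] at hx
        by_cases hxc : x = c
        · subst hxc
          rw [List.count_cons_self]
          simp only [beq_self_eq_true, if_true] at hx
          omega
        · rw [List.count_cons_of_ne (Ne.symm hxc)]
          have : (c == x) = false := by simp [Ne.symm hxc]
          simp only [this, Bool.false_eq_true, if_false, Nat.sub_zero] at hx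
          omega
      · intro hall x
        have hx := hall x
        rw [List.count_erase]
        by_cases hxc : x = c
        · subst hxc
          rw [List.count_cons_self] at hx
          simp only [beq_self_eq_true, if_true]
          omega
        · rw [List.count_cons_of_ne (Ne.symm hxc)] at hx
          have : (c == x) = false := by simp [Ne.symm hxc]
          simp only [this, Bool.false_eq_true, if_false, Nat.sub_zero]
          omega
    · have hcnt : pool.count c = 0 := by
        have := h c
        rw [this] at hpos
        omega
      have hstep : altStep (d, (pool.length : Int)) c = (d, (pool.length : Int)) := by
        simp only [altStep, if_neg hpos]
      rw [hstep, ih _ _ h]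
      constructor
      · intro hall x
        have hx := hall x
        by_cases hxc : x = c
        · subst hxc; rw [List.count_cons_self]; omega
        · rw [List.count_cons_of_ne (Ne.symm hxc)]; exact hx
      · intro hall x
        have hx := hall x
        by_cases hxc : x = c
        · subst hxc; omega
        · rw [List.count_cons_of_ne (Ne.symm hxc)] at hx; exact hx

-- B succeeds exactly when the word's letters fit multiset-wise into the input's.
theorem portB_eq_true_iff (input_sorted word_sorted : String) :
    can_form_word_alt input_sorted word_sorted = true
    ↔ ∀ x, word_sorted.toList.count x ≤ input_sorted.toList.count x := by
  unfold can_form_word_alt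
  have hneed : ∀ x, (word_sorted.toList.foldl
      (fun d c => d.insert c (d.getD c 0 + 1)) PySem.Dict.empty).getD x 0
      = (word_sorted.toList.count x : Int) := by
    intro x
    rw [PySem.Dict.getD_foldl_insert_add_one, PySem.Dict.getD_empty]
    omega
  have hlen : PySem.Str.len word_sorted = ((word_sorted.toList.length : Nat) : Int) := by
    simp [PySem.Str.len_eq]
  simp only [beq_iff_eq]
  rw [hlen, loop_rem _ _ _ hneed]

theorem count_le_length (i w : List Char) (h : ∀ c, w.count c ≤ i.count c) :
    w.length ≤ i.length :=
  (List.subperm_ext_iff.mpr (fun x _ => h x)).length_le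

-- ===== VERDICT (by name: the statement is the Claim_ definition above) =====
theorem can_form_word_spec : Claim_equal_can_form_word := by
  intro input_sorted word_sorted _
  unfold Spec_can_form_word
  rw [Bool.eq_iff_iff, portB_eq_true_iff]
  unfold can_form_word
  simp only [PySem.Str.len_eq]
  by_cases hlen : word_sorted.toList.length > input_sorted.toList.length
  · rw [if_pos (by exact_mod_cast hlen)]
    constructor
    · intro h; exact absurd h (by simp)
    · intro h
      exact absurd (count_le_length _ _ h) (by omega)
  · rw [if_neg (by exact_mod_cast hlen)]
    rw [portA_eq_true_iff]
    constructor
    · intro h x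
      by_cases hx : x ∈ word_sorted.toList
      · exact h x hx
      · simp [List.count_eq_zero_of_not_mem hx]
    · intro h x _; exact h x
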